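-- pv_equiv track=rewrite | github.com/Magister-Faceless/author | REFERENCES/example_codes/subagents_code/synthesis_engine.py | _calculate_overall_strength
-- ===== SOURCE A (Python) =====
-- from typing import Dict, List, Any, Optional
--
-- def _calculate_overall_strength(assessments: List[Dict[str, Any]]) -> str:
--     """Calculate overall strength across all themes."""
--     strengths = [a["strength_of_evidence"] for a in assessments]
--     if "high" in strengths:
--         return "moderate_to_high"
--     elif "moderate" in strengths:
--         return "moderate"
--     else:
--         return "low"
-- ===== SOURCE B (Python) =====
-- def _calculate_overall_strength(assessments):
--     """Calculate overall strength across all themes."""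
--     rank = {"high": 2, "moderate": 1}
--     best = 0
--     for a in assessments:
--         best = max(best, rank.get(a["strength_of_evidence"], 0))
--     return "moderate_to_high" if best == 2 else ("moderate" if best == 1 else "low")
-- ===== Notes on version B (the rewrite author's own statement) =====
-- stated objective: alternative
-- what changed: Replaces the two ordered membership scans over a materialised strengths list with a single fold that tracks the maximum evidence rank (high=2, moderate=1, other=0) and maps the winning rank back to a label.
import Mathlib
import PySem

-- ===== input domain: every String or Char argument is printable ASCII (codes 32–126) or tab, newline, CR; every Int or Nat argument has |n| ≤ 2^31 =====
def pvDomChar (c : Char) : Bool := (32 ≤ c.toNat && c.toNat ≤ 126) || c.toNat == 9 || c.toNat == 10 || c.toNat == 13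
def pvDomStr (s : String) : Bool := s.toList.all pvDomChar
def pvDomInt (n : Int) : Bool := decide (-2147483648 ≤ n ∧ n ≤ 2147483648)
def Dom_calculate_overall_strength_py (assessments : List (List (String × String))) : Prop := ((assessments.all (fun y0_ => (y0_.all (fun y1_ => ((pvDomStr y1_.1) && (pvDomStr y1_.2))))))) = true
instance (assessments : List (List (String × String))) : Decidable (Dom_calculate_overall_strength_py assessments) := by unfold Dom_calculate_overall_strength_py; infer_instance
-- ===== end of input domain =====

-- B replaces A's two ordered membership scans with one fold computing the maximum
-- evidence rank (high=2, moderate=1, other=0), mapped back to a label (alternative, same cost).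

-- ===== PORT A =====
def calculate_overall_strength_py (assessments : List (List (String × String))) : String :=
  let strengths := assessments.map (fun a => (PySem.Dict.mk a).get? "strength_of_evidence")
  if some "high" ∈ strengths then "moderate_to_high"
  else if some "moderate" ∈ strengths then "moderate"
  else "low"

-- ===== PORT B =====
def calculate_overall_strength_py_alt (assessments : List (List (String × String))) : String :=
  let rank : PySem.Dict String Int := PySem.Dict.ofList [("high", 2), ("moderate", 1)]
  let best : Int := assessments.foldl
    (fun best a => max best (rank.getD (((PySem.Dict.mk a).get? "strength_of_evidence").getD "") 0)) 0
  if best = 2 then "moderate_to_high" else if best = 1 then "moderate" else "low"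

-- ===== PRECONDITION & SPEC =====
-- Pre_ excludes assessments missing the "strength_of_evidence" key, on which the Python A raises KeyError.
def Pre_calculate_overall_strength_py (assessments : List (List (String × String))) : Prop :=
  ∀ a ∈ assessments, "strength_of_evidence" ∈ a.map Prod.fst
instance (assessments : List (List (String × String))) : Decidable (Pre_calculate_overall_strength_py assessments) := by unfold Pre_calculate_overall_strength_py; infer_instance
def pvWitness_calculate_overall_strength_py : (List (List (String × String))) :=
  [[("strength_of_evidence", "high")], [("strength_of_evidence", "low")]]

def Spec_calculate_overall_strength_py (assessments : List (List (String × String))) (out : String) : Prop := out = calculate_overall_strength_py_alt assessments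
instance (assessments : List (List (String × String))) (out : String) : Decidable (Spec_calculate_overall_strength_py assessments out) := by unfold Spec_calculate_overall_strength_py; infer_instance

-- ===== CLAIM (what is proved, stated in full; the proofs are below) =====
def Claim_equal_calculate_overall_strength_py : Prop := ∀ (assessments : List (List (String × String))), Dom_calculate_overall_strength_py assessments → Pre_calculate_overall_strength_py assessments → Spec_calculate_overall_strength_py assessments (calculate_overall_strength_py assessments)

-- ===== LEMMAS AND PROOFS =====

-- the rank B's fold assigns to one assessment's (optional) strength value
def pvR (o : Option String) : Int :=
  (PySem.Dict.ofList [("high", (2:Int)), ("moderate", 1)]).getD (o.getD "") 0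

-- A's label, as a function of the list of looked-up strength values
def pvC (L : List (Option String)) : Int :=
  if some "high" ∈ L then 2 else if some "moderate" ∈ L then 1 else 0

lemma pvR_cases (o : Option String) :
    pvR o = if o = some "high" then 2 else if o = some "moderate" then 1 else 0 := by
  rcases o with _ | s
  · decide
  · by_cases h1 : s = "high"
    · subst h1; decide
    · by_cases h2 : s = "moderate"
      · subst h2; simp [h1]; decide
      · have hb1 : ("high" == s) = false := by simp [beq_eq_false_iff_ne]; exact Ne.symm h1
        have hb2 : ("moderate" == s) = false := by simp [beq_eq_false_iff_ne]; exact Ne.symm h2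
        simp [pvR, PySem.Dict.ofList, PySem.Dict.getD, PySem.Dict.get?, PySem.Dict.update,
          PySem.Dict.empty, PySem.Dict.insert, List.find?, h1, h2, hb1, hb2]
lemma pvC_bounds (L : List (Option String)) : 0 ≤ pvC L ∧ pvC L ≤ 2 := by
  unfold pvC; split_ifs <;> omega

lemma pvC_cons (o : Option String) (L : List (Option String)) :
    pvC (o :: L) = max (if o = some "high" then 2 else if o = some "moderate" then 1 else 0) (pvC L) := by
  unfold pvC
  simp only [List.mem_cons]
  split_ifs <;> simp_all

lemma pvFold_eq (l : List (List (String × String))) : ∀ b : Int, 0 ≤ b →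
    l.foldl (fun best a =>
      max best ((PySem.Dict.ofList [("high", (2:Int)), ("moderate", 1)]).getD
        (((PySem.Dict.mk a).get? "strength_of_evidence").getD "") 0)) b
    = max b (pvC (l.map (fun a => (PySem.Dict.mk a).get? "strength_of_evidence"))) := by
  induction l with
  | nil => intro b hb; simp [pvC]; omega
  | cons x xs ih =>
    intro b hb
    have hx := pvR_cases ((PySem.Dict.mk x).get? "strength_of_evidence")
    have hb' : (0:Int) ≤ max b (pvR ((PySem.Dict.mk x).get? "strength_of_evidence")) := by
      rw [hx]; split_ifs <;> omega
    have step : (List.cons x xs).foldl (fun best a =>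
        max best ((PySem.Dict.ofList [("high", (2:Int)), ("moderate", 1)]).getD
          (((PySem.Dict.mk a).get? "strength_of_evidence").getD "") 0)) b
        = xs.foldl (fun best a =>
        max best ((PySem.Dict.ofList [("high", (2:Int)), ("moderate", 1)]).getD
          (((PySem.Dict.mk a).get? "strength_of_evidence").getD "") 0))
          (max b (pvR ((PySem.Dict.mk x).get? "strength_of_evidence"))) := rfl
    rw [step, ih _ hb', List.map_cons, pvC_cons, hx]
    obtain ⟨hc0, hc2⟩ := pvC_bounds (xs.map (fun a => (PySem.Dict.mk a).get? "strength_of_evidence"))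
    split_ifs <;> omega

theorem calculate_overall_strength_py_spec : Claim_equal_calculate_overall_strength_py := by
  intro assessments _ _
  unfold Spec_calculate_overall_strength_py calculate_overall_strength_py calculate_overall_strength_py_alt
  simp only []
  rw [pvFold_eq assessments 0 le_rfl]
  obtain ⟨hc0, hc2⟩ := pvC_bounds (assessments.map (fun a => (PySem.Dict.mk a).get? "strength_of_evidence"))
  simp only [max_eq_right hc0]
  unfold pvC at *
  split_ifs <;> first | rfl | omega
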